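-- pv_equiv track=rewrite | github.com/kindjacket/advent_of_code | 2020/day6/star1.py | clean_group_forms
-- ===== SOURCE A (Python) =====
-- def clean_group_forms(input_data: list[str]):
--     group_inputs = []
--     group_input = set()
--     ### add blank list to the end of the list so logic works smoomthly. A bit of hack
--     input_data.append([])
--     for i in input_data:
--         if len(i) > 0:
--             group_input.update(set(list(i)))
--         else:
--             ### line break and therefore end of input data
--             group_inputs.append(group_input)
--             group_input = set()
--     return group_inputs
-- ===== SOURCE B (Python) =====
-- def clean_group_forms(input_data: list[str]):
--     ### keep A's end-of-blank-sentinel hack (and its observable mutation of input_data)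
--     input_data.append([])
--     groups = []
--     n = len(input_data)
--     j = 0
--     while True:
--         # scan forward to the next blank line (two-pointer segment scan)
--         k = j
--         while k < n and len(input_data[k]) > 0:
--             k += 1
--         if k == n:
--             break
--         groups.append({ch for line in input_data[j:k] for ch in line})
--         j = k + 1
--     return groups
-- ===== Notes on version B (the rewrite author's own statement) =====
-- stated objective: alternative
-- what changed: Replaces A's element-by-element flush-on-blank loop that grows a running set with a two-pointer segment scan: an outer loop finds the next blank line, and each whole segment of lines is reduced to its character union by a set comprehension.
import Mathlib
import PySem

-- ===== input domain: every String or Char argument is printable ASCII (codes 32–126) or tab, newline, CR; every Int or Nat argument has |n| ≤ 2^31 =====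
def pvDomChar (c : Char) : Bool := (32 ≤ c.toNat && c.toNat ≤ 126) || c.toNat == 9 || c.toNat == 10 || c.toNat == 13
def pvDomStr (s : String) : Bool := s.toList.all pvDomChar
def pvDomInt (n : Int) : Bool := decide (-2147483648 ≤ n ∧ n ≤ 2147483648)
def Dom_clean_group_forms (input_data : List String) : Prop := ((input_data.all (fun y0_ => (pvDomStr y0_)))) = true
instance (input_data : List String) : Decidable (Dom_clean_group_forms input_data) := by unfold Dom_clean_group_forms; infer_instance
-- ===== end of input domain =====

-- B replaces A's interleaved flush-on-blank set accumulation with a two-pointer scan that cuts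
-- the lines into blank-terminated segments and reduces each whole segment to its character union
-- (alternative decomposition, same cost). Both A and B append a blank sentinel to input_data
-- (observable mutation); the equivalence proved is about the return value.

-- ===== PORT A =====
-- set(list(i)) : the characters of a line, as one-character strings
def pvChars (s : String) : List String := s.toList.map (fun c => String.ofList [c])

def clean_group_forms (input_data : List String) : List (List String) :=
  ((input_data ++ [""]).foldl
    (fun (st : List (List String) × PySem.Set String) i =>
      if PySem.Str.len i > 0 then
        (st.1, PySem.Set.update st.2 (PySem.Set.ofList (pvChars i)))
      else
        (st.1 ++ [st.2], PySem.Set.empty))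
    ([], PySem.Set.empty)).1

-- ===== PORT B =====
-- the outer while loop of Source B: cut off the segment before the next blank line (the inner
-- index scan is rendered by takeWhile/dropWhile), reduce it to its character union, recurse
-- after the blank; if no blank is left the loop breaks with nothing more appended.
def pvSegGroups (lines : List String) : List (List String) :=
  if (lines.dropWhile (fun s => PySem.Str.len s > 0)).isEmpty then []
  else
    PySem.Set.ofList ((lines.takeWhile (fun s => PySem.Str.len s > 0)).flatMap pvChars)
      :: pvSegGroups (lines.dropWhile (fun s => PySem.Str.len s > 0)).tail
termination_by lines.length
decreasing_by
  rename_i h2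
  have h1 := List.length_dropWhile_le (fun s => decide (PySem.Str.len s > 0)) lines
  cases hr : lines.dropWhile (fun s => decide (PySem.Str.len s > 0)) with
  | nil => rw [hr] at h2; simp at h2
  | cons a t => rw [hr] at h1; simp at h1 ⊢; omega

def clean_group_forms_alt (input_data : List String) : List (List String) :=
  pvSegGroups (input_data ++ [""])

-- ===== PRECONDITION & SPEC =====
def Spec_clean_group_forms (input_data : List String) (out : List (List String)) : Prop := out = clean_group_forms_alt input_data
instance (input_data : List String) (out : List (List String)) : Decidable (Spec_clean_group_forms input_data out) := by unfold Spec_clean_group_forms; infer_instance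

-- ===== CLAIM =====
def Claim_equal_clean_group_forms : Prop := ∀ (input_data : List String), Dom_clean_group_forms input_data → Spec_clean_group_forms input_data (clean_group_forms input_data)

-- ===== LEMMAS AND PROOFS =====
-- the character union of a segment, as A builds it incrementally
def pvReduce (g : List String) : PySem.Set String := PySem.Set.ofList (g.flatMap pvChars)

-- A's loop, rephrased as a recursion that carries the current segment instead of the running set
def pvAux : List String → List String → List (List String)
  | _, [] => []
  | cur, i :: t =>
      if PySem.Str.len i > 0 then pvAux (cur ++ [i]) t else pvReduce cur :: pvAux [] t

-- s.update(set(xs)) = s.update(xs)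
theorem pv_update_ofList (s : PySem.Set String) (xs : List String) :
    PySem.Set.update s (PySem.Set.ofList xs) = PySem.Set.update s xs := by
  rw [PySem.Set.update_eq_append_filter, PySem.Set.update_eq_append_filter,
    PySem.Set.ofList_ofList]

theorem pv_reduce_snoc (g : List String) (i : String) :
    pvReduce (g ++ [i]) = PySem.Set.update (pvReduce g) (pvChars i) := by
  simp [pvReduce, List.flatMap_append, PySem.Set.ofList_append]

theorem pv_aux_cons (cur : List String) (i : String) (t : List String) :
    pvAux cur (i :: t) =
      if PySem.Str.len i > 0 then pvAux (cur ++ [i]) t else pvReduce cur :: pvAux [] t := rfl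

-- A's fold equals the segment recursion pvAux
theorem pv_loop (l : List String) (acc : List (List String)) (cur : List String) :
    (l.foldl
      (fun (st : List (List String) × PySem.Set String) i =>
        if PySem.Str.len i > 0 then
          (st.1, PySem.Set.update st.2 (PySem.Set.ofList (pvChars i)))
        else
          (st.1 ++ [st.2], PySem.Set.empty))
      (acc, pvReduce cur)).1
    = acc ++ pvAux cur l := by
  induction l generalizing acc cur with
  | nil => simp [pvAux]
  | cons i t ih =>
    rw [List.foldl_cons, pv_aux_cons]
    by_cases h : PySem.Str.len i > 0
    · rw [if_pos h, if_pos h, pv_update_ofList, ← pv_reduce_snoc]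
      exact ih acc (cur ++ [i])
    · rw [if_neg h, if_neg h]
      have h2 := ih (acc ++ [pvReduce cur]) []
      rw [List.append_assoc] at h2
      exact h2

-- pvAux in takeWhile/dropWhile form (the shape of B's segment scan)
theorem pv_aux_seg (l : List String) (cur : List String) :
    pvAux cur l =
      match l.dropWhile (fun s => PySem.Str.len s > 0) with
      | [] => []
      | _ :: tail =>
          pvReduce (cur ++ l.takeWhile (fun s => PySem.Str.len s > 0)) :: pvAux [] tail := by
  induction l generalizing cur with
  | nil => simp [pvAux]
  | cons i t ih =>
    rw [pv_aux_cons]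
    by_cases h : PySem.Str.len i > 0
    · rw [if_pos h, ih (cur ++ [i])]
      simp only [List.dropWhile_cons, List.takeWhile_cons, h, decide_true, if_true]
      rw [List.append_assoc]
      rfl
    · rw [if_neg h]
      simp only [List.dropWhile_cons, List.takeWhile_cons, h, decide_false, Bool.false_eq_true,
        if_false]
      rw [List.append_nil]

-- B's segment recursion equals pvAux
theorem pv_seg_eq_aux (l : List String) : pvSegGroups l = pvAux [] l := by
  induction l using pvSegGroups.induct with
  | case1 l h =>
    have hnil := List.isEmpty_iff.mp h
    rw [pvSegGroups.eq_def, pv_aux_seg, hnil]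
    simp
  | case2 l h ih =>
    cases hr : l.dropWhile (fun s => PySem.Str.len s > 0) with
    | nil => rw [hr] at h; simp at h
    | cons x tail =>
      rw [pvSegGroups.eq_def, pv_aux_seg, hr]
      rw [hr] at ih
      simp only [List.tail_cons] at ih
      simp only [List.isEmpty_cons, Bool.false_eq_true, if_false, List.tail_cons]
      rw [ih]
      simp [pvReduce]

-- ===== VERDICT =====
theorem clean_group_forms_spec : Claim_equal_clean_group_forms := by
  intro input_data _
  show clean_group_forms input_data = clean_group_forms_alt input_data
  unfold clean_group_forms clean_group_forms_alt
  exact (pv_loop (input_data ++ [""]) [] []).trans (pv_seg_eq_aux _).symm
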